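-- pv_equiv track=rewrite | github.com/mosaicthej/algorithm-design | distributionDist-code.py | sumD
-- ===== SOURCE A (Python) =====
-- def sumD(B, A):
--     # for each A[i], find the closest element in B
--     # D[i] = |A[i] - B[j]|
--     # return the sum of D[1...n]
--     D = [0]*len(A)
--     for i in range(len(A)):
--         # find the closest element in B
--         minD = abs(A[i] - B[0])
--         for j in range(len(B)):
--             if abs(A[i] - B[j]) < minD:
--                 minD = abs(A[i] - B[j])
--         D[i] = minD
--     return sum(D)
-- ===== SOURCE B (Python) =====
-- def sumD(B, A):
--     # sort B once, then binary-search the insertion point of each A[i];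
--     # the closest element of B is one of the two neighbours of that point
--     if not A:
--         return 0
--     S = sorted(B)
--     m = len(S)
--     total = 0
--     for a in A:
--         lo, hi = 0, m
--         while lo < hi:
--             mid = (lo + hi) // 2
--             if S[mid] < a:
--                 lo = mid + 1
--             else:
--                 hi = mid
--         best = S[lo] - a if lo < m else a - S[m - 1]
--         if lo > 0:
--             d = a - S[lo - 1]
--             if d < best:
--                 best = d
--         total += best
--     return total
-- ===== Notes on version B (the rewrite author's own statement) =====
-- stated objective: faster
-- what changed: Instead of scanning all of B for every element of A (nested loops), B sorts B once and binary-searches each A[i]'s insertion point; the closest element is one of its two neighbours.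
import Mathlib
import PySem

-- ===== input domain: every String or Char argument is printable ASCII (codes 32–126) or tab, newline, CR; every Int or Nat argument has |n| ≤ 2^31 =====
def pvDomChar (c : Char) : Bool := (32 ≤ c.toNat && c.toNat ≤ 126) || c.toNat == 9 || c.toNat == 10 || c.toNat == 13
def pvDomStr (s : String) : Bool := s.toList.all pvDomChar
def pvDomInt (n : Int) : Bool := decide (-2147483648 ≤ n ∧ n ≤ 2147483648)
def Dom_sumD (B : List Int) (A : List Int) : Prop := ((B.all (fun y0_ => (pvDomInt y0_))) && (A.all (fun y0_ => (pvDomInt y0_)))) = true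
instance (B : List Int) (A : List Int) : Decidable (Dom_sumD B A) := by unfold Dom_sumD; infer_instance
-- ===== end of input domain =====

-- B sorts B once and binary-searches each A[i] instead of A's nested full scan: O((n+m) log m) vs O(n*m).


-- ===== PORT A =====
-- inner loop: minD = abs(A[i]-B[0]); for j in range(len(B)): if abs(A[i]-B[j]) < minD: minD = abs(A[i]-B[j])
def sumDInner (B : List Int) (a : Int) : Int :=
  match PySem.List.pyGet? B 0 with
  | none => 0   -- B[0] raises IndexError here; excluded by Pre_sumD
  | some b0 => B.foldl (fun minD b => if |a - b| < minD then |a - b| else minD) |a - b0|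

def sumD (B : List Int) (A : List Int) : Int :=
  (A.map (fun a => sumDInner B a)).sum   -- D[i] = minD for each i; return sum(D)

-- ===== PORT B =====
-- the hand-written while-loop binary search of Source B (bisect-left insertion point)
-- structural recursion on a fuel n with invariant hi - lo ≤ n (hi - lo strictly decreases)
def bisectLoop (S : List Int) (a : Int) : Nat → Nat → Nat → Nat
  | 0, lo, _hi => lo
  | Nat.succ n, lo, hi =>
    if lo < hi then
      let mid := (lo + hi) / 2
      if S.getD mid 0 < a then bisectLoop S a n (mid + 1) hi   -- mid < hi ≤ len: getD is exact S[mid]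
      else bisectLoop S a n lo mid
    else lo

def closestDist (S : List Int) (a : Int) : Int :=
  let m := S.length
  let lo := bisectLoop S a m 0 m
  let best := if lo < m then S.getD lo 0 - a else a - S.getD (m - 1) 0
  if 0 < lo then
    let d := a - S.getD (lo - 1) 0
    if d < best then d else best
  else best

def sumD_alt (B : List Int) (A : List Int) : Int :=
  if A = [] then 0
  else
    let S := PySem.List.sorted B (fun x => x) false
    A.foldl (fun total a => total + closestDist S a) 0

-- ===== PRECONDITION & SPEC =====
-- Pre_ excludes B = [] with A ≠ [], where A raises IndexError on B[0] (and Source B raises on S[m-1] too).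
def Pre_sumD (B : List Int) (A : List Int) : Prop := B ≠ [] ∨ A = []
instance (B : List Int) (A : List Int) : Decidable (Pre_sumD B A) := by unfold Pre_sumD; infer_instance
def pvWitness_sumD : List Int × List Int := ([1, 3], [2, -5])

def Spec_sumD (B : List Int) (A : List Int) (out : Int) : Prop := out = sumD_alt B A
instance (B : List Int) (A : List Int) (out : Int) : Decidable (Spec_sumD B A out) := by unfold Spec_sumD; infer_instance

-- ===== CLAIM (what is proved, stated in full; the proofs are below) =====
def Claim_equal_sumD : Prop := ∀ (B : List Int) (A : List Int), Dom_sumD B A → Pre_sumD B A → Spec_sumD B A (sumD B A)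

-- ===== LEMMAS AND PROOFS =====

-- sorted lists are getD-monotone
theorem getD_mono {S : List Int} (hp : S.Pairwise (· ≤ ·)) {i j : Nat}
    (hij : i ≤ j) (hj : j < S.length) : S.getD i 0 ≤ S.getD j 0 := by
  rcases eq_or_lt_of_le hij with rfl | h
  · exact le_rfl
  · have hi : i < S.length := lt_trans h hj
    have := (List.pairwise_iff_getElem.mp hp) i j hi hj h
    rwa [List.getD_eq_getElem _ _ hi, List.getD_eq_getElem _ _ hj]

-- loop invariant of the binary search: the result splits S into "< a" and "≥ a"
theorem bisect_inv {S : List Int} (a : Int) (hp : S.Pairwise (· ≤ ·)) :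
    ∀ (n lo hi : Nat), hi - lo ≤ n → lo ≤ hi → hi ≤ S.length →
    (∀ j, j < lo → S.getD j 0 < a) →
    (∀ j, hi ≤ j → j < S.length → a ≤ S.getD j 0) →
    lo ≤ bisectLoop S a n lo hi ∧ bisectLoop S a n lo hi ≤ hi ∧
    (∀ j, j < bisectLoop S a n lo hi → S.getD j 0 < a) ∧
    (∀ j, bisectLoop S a n lo hi ≤ j → j < S.length → a ≤ S.getD j 0) := by
  intro n
  induction n with
  | zero =>
    intro lo hi hn hlh hhl hL hR
    have : lo = hi := by omega
    subst this
    simp only [bisectLoop]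
    exact ⟨le_rfl, le_rfl, hL, hR⟩
  | succ n ih =>
    intro lo hi hn hlh hhl hL hR
    simp only [bisectLoop]
    by_cases hlt : lo < hi
    · simp only [hlt, if_true]
      set mid := (lo + hi) / 2 with hmid
      have hmlo : lo ≤ mid := by omega
      have hmhi : mid < hi := by omega
      by_cases hc : S.getD mid 0 < a
      · simp only [hc, if_true]
        have hL' : ∀ j, j < mid + 1 → S.getD j 0 < a := by
          intro j hj
          by_cases hjlo : j < lo
          · exact hL j hjlo
          · exact lt_of_le_of_lt (getD_mono hp (by omega) (by omega)) hc
        have h := ih (mid + 1) hi (by omega) (by omega) hhl hL' hR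
        exact ⟨by omega, h.2.1, h.2.2.1, h.2.2.2⟩
      · simp only [hc, if_false]
        rw [not_lt] at hc
        have hR' : ∀ j, mid ≤ j → j < S.length → a ≤ S.getD j 0 := by
          intro j hj hjl
          exact le_trans hc (getD_mono hp hj hjl)
        have h := ih lo mid (by omega) hmlo (by omega) hL hR'
        exact ⟨h.1, by omega, h.2.2.1, h.2.2.2⟩
    · simp only [hlt, if_false]
      have : lo = hi := by omega
      subst this
      exact ⟨le_rfl, le_rfl, hL, hR⟩

-- closestDist is a lower bound on every distance |a - b|, b ∈ S …
theorem closestDist_le {S : List Int} (a : Int) (hp : S.Pairwise (· ≤ ·)) :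
    ∀ b ∈ S, closestDist S a ≤ |a - b| := by
  intro b hb
  obtain ⟨j, hj, rfl⟩ := List.mem_iff_getElem.mp hb
  have h := bisect_inv a hp S.length 0 S.length (by omega) (by omega) le_rfl
    (by intro j hj; omega) (by intro j hj hjl; omega)
  set i := bisectLoop S a S.length 0 S.length with hi
  obtain ⟨-, him, hL, hR⟩ := h
  simp only [closestDist]
  rw [← hi]
  have hgj : S.getD j 0 = S[j] := List.getD_eq_getElem _ _ hj
  by_cases hji : j < i
  · -- left side: S[j] < a, and a - S[i-1] is the smallest such distance
    have h0i : 0 < i := by omega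
    have hSj : S[j] < a := by rw [← hgj]; exact hL j hji
    have habs : |a - S[j]| = a - S[j] := abs_of_pos (by omega)
    have hmono : S.getD j 0 ≤ S.getD (i - 1) 0 := getD_mono hp (by omega) (by omega)
    have hd : a - S.getD (i - 1) 0 ≤ |a - S[j]| := by rw [habs, ← hgj]; omega
    simp only [h0i, if_true]
    split_ifs with h1 <;> omega
  · -- right side: a ≤ S[j], and S[i] - a is the smallest such distance
    have him' : i < S.length := by omega
    have hSj : a ≤ S[j] := by rw [← hgj]; exact hR j (by omega) hj
    have habs : |a - S[j]| = S[j] - a := by rw [abs_sub_comm]; exact abs_of_nonneg (by omega)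
    have hmono : S.getD i 0 ≤ S.getD j 0 := getD_mono hp (by omega) hj
    have hb0 : S.getD i 0 - a ≤ |a - S[j]| := by rw [habs, ← hgj]; omega
    simp only [him', if_true]
    split_ifs with h1 h2 <;> omega

theorem getD_mem_of_lt {S : List Int} {i : Nat} (h : i < S.length) : S.getD i 0 ∈ S := by
  rw [List.getD_eq_getElem _ _ h]; exact List.getElem_mem h

-- … and is attained by some element of S
theorem closestDist_mem {S : List Int} (a : Int) (hp : S.Pairwise (· ≤ ·)) (hS : S ≠ []) :
    ∃ b ∈ S, closestDist S a = |a - b| := by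
  have hm : 0 < S.length := List.length_pos_iff.mpr hS
  have h := bisect_inv a hp S.length 0 S.length (by omega) (by omega) le_rfl
    (by intro j hj; omega) (by intro j hj hjl; omega)
  set i := bisectLoop S a S.length 0 S.length with hi
  obtain ⟨-, him, hL, hR⟩ := h
  simp only [closestDist]
  rw [← hi]
  have hleft : 0 < i → a - S.getD (i - 1) 0 = |a - S.getD (i - 1) 0| := by
    intro h0
    have := hL (i - 1) (by omega)
    rw [abs_of_pos (by omega)]
  have hright : i < S.length → S.getD i 0 - a = |a - S.getD i 0| := by
    intro hil
    have := hR i le_rfl hil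
    rw [abs_sub_comm, abs_of_nonneg (by omega)]
  by_cases hil : i < S.length
  · simp only [hil, if_true]
    by_cases h0 : 0 < i
    · simp only [h0, if_true]
      split_ifs with h1
      · exact ⟨S.getD (i - 1) 0, getD_mem_of_lt (by omega), hleft h0⟩
      · exact ⟨S.getD i 0, getD_mem_of_lt hil, hright hil⟩
    · simp only [h0, if_false]
      exact ⟨S.getD i 0, getD_mem_of_lt hil, hright hil⟩
  · simp only [hil, if_false]
    have h0 : 0 < i := by omega
    have hi1 : a - S.getD (S.length - 1) 0 = |a - S.getD (S.length - 1) 0| := by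
      have := hL (S.length - 1) (by omega)
      rw [abs_of_pos (by omega)]
    simp only [h0, if_true]
    split_ifs with h1
    · exact ⟨S.getD (i - 1) 0, getD_mem_of_lt (by omega), hleft h0⟩
    · exact ⟨S.getD (S.length - 1) 0, getD_mem_of_lt (by omega), hi1⟩

-- A's inner fold: lower bound of all |a-b| over the traversed list and the init, attained
theorem foldMin_spec (a : Int) :
    ∀ (xs : List Int) (init : Int),
    (xs.foldl (fun m b => if |a - b| < m then |a - b| else m) init = init ∨
      ∃ b ∈ xs, xs.foldl (fun m b => if |a - b| < m then |a - b| else m) init = |a - b|) ∧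
    xs.foldl (fun m b => if |a - b| < m then |a - b| else m) init ≤ init ∧
    (∀ b ∈ xs, xs.foldl (fun m b => if |a - b| < m then |a - b| else m) init ≤ |a - b|) := by
  intro xs
  induction xs with
  | nil => intro init; exact ⟨Or.inl rfl, le_rfl, by simp⟩
  | cons x t ih =>
    intro init
    simp only [List.foldl_cons]
    obtain ⟨hmem, hle, hall⟩ := ih (if |a - x| < init then |a - x| else init)
    constructor
    · rcases hmem with h | ⟨b, hb, hbe⟩
      · rw [h]; split_ifs with h1
        · exact Or.inr ⟨x, List.mem_cons_self, rfl⟩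
        · exact Or.inl rfl
      · exact Or.inr ⟨b, List.mem_cons_of_mem _ hb, hbe⟩
    constructor
    · refine le_trans hle ?_; split_ifs with h1 <;> omega
    · intro b hb
      rcases List.mem_cons.mp hb with rfl | hb'
      · refine le_trans hle ?_; split_ifs with h1 <;> omega
      · exact hall b hb'

-- per-element equality: A's inner scan = B's bisect-based distance
theorem inner_eq (B : List Int) (a : Int) (hB : B ≠ []) :
    sumDInner B a = closestDist (PySem.List.sorted B (fun x => x) false) a := by
  set S := PySem.List.sorted B (fun x => x) false with hS
  have hp : S.Pairwise (· ≤ ·) := PySem.List.sorted_pairwise B (fun x => x)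
  have hperm : S.Perm B := PySem.List.sorted_perm B (fun x => x) false
  have hSne : S ≠ [] := by
    intro h
    apply hB
    have hp2 := hperm
    rw [h] at hp2
    exact hp2.symm.eq_nil
  obtain ⟨b0, t, rfl⟩ := List.exists_cons_of_ne_nil hB
  unfold sumDInner
  have hget : PySem.List.pyGet? (b0 :: t) 0 = some b0 := by
    simp [PySem.List.pyGet?, PySem.List.pyIdx?]
  rw [hget]
  dsimp only
  obtain ⟨hmem, -, hall⟩ := foldMin_spec a (b0 :: t) |a - b0|
  set r := (b0 :: t).foldl (fun m b => if |a - b| < m then |a - b| else m) |a - b0| with hr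
  -- r = |a - b| for some b ∈ B (init is itself such a value)
  have hrmem : ∃ b ∈ b0 :: t, r = |a - b| := by
    rcases hmem with h | h
    · exact ⟨b0, List.mem_cons_self, h⟩
    · exact h
  obtain ⟨br, hbr, hbre⟩ := hrmem
  obtain ⟨bc, hbc, hbce⟩ := closestDist_mem a hp hSne
  have h1 : r ≤ closestDist S a := by
    rw [hbce]; exact hall bc (hperm.mem_iff.mp hbc)
  have h2 : closestDist S a ≤ r := by
    rw [hbre]; exact closestDist_le a hp br (hperm.mem_iff.mpr hbr)
  omega

-- ===== VERDICT (by name: the statement is the Claim_ definition above) =====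
theorem sumD_spec : Claim_equal_sumD := by
  intro B A _ hpre
  unfold Spec_sumD sumD sumD_alt
  by_cases hA : A = []
  · subst hA; simp
  · rcases hpre with hB | hA' 
    · simp only [hA, if_false]
      have h1 : ∀ a, sumDInner B a = closestDist (PySem.List.sorted B (fun x => x) false) a :=
        fun a => inner_eq B a hB
      simp only [h1]
      rw [← List.foldl_map (f := fun a => closestDist (PySem.List.sorted B (fun x => x) false) a)
            (g := fun total x => total + x), List.sum_eq_foldl]
    · exact absurd hA' hA
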